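-- pv_equiv track=rewrite | github.com/Siser-Pratap/streamlit-backend | processing/pdf_report_generator.py | organize_charts_by_category
-- ===== SOURCE A (Python) =====
-- from typing import List, Tuple, Dict, Any
--
-- def detect_graph_type(chart_title: str) -> str:
--     """
--     Detect and return the type of graph based on chart title
--     """
--     title_lower = chart_title.lower()
--
--     # Graph type detection logic
--     if any(keyword in title_lower for keyword in ['bar', 'column', 'histogram']):
--         return "Bar Chart"
--     elif any(keyword in title_lower for keyword in ['line', 'trend', 'progression', 'over time']):
--         return "Line Chart"
--     elif any(keyword in title_lower for keyword in ['pie', 'donut', 'distribution']):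
--         return "Pie Chart"
--     elif any(keyword in title_lower for keyword in ['scatter', 'correlation']):
--         return "Scatter Plot"
--     elif any(keyword in title_lower for keyword in ['heatmap', 'heat map', 'density']):
--         return "Heatmap"
--     elif any(keyword in title_lower for keyword in ['3d', 'three', 'dimensional']):
--         return "3D Visualization"
--     elif any(keyword in title_lower for keyword in ['area', 'stacked']):
--         return "Area Chart"
--     elif any(keyword in title_lower for keyword in ['bubble', 'size']):
--         return "Bubble Chart"
--     else:
--         return "Data Visualization"
--
-- def organize_charts_by_category(charts: List[Tuple[str, str]]) -> Dict[str, List[Tuple[str, str]]]: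
--     """
--     Organize charts into categories based on their titles for better presentation
--     Enhanced to work with both generated charts and existing chart images
--     """
--     categories = {
--         "Trend Analysis & Time Series": [],
--         "Platform & Channel Analysis": [],
--         "Sentiment & Engagement Analysis": [],
--         "Value & ROI Analysis": [],
--         "Correlation & Advanced Analytics": [],
--         "Other Analytics": [],
--         "Data Distribution & Performance": [],
--     }
--
--     for chart_title, chart_path in charts:
--         title_lower = chart_title.lower()
--         graph_type = detect_graph_type(chart_title)
--
--         # Enhanced categorization with better keywords and emojis
--         if any(keyword in title_lower for keyword in ['media', 'distribution', 'count', 'type', 'pie', 'bar']):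
--             categories["Data Distribution & Performance"].append((chart_title, chart_path))
--         elif any(keyword in title_lower for keyword in ['trend', 'time', 'over time', 'progression', 'line', 'series']):
--             categories["Trend Analysis & Time Series"].append((chart_title, chart_path))
--         elif any(keyword in title_lower for keyword in ['platform', 'channel', 'comparison', 'performance']):
--             categories["Platform & Channel Analysis"].append((chart_title, chart_path))
--         elif any(keyword in title_lower for keyword in ['sentiment', 'engagement', 'emotion', 'feeling']):
--             categories["Sentiment & Engagement Analysis"].append((chart_title, chart_path))
--         elif any(keyword in title_lower for keyword in ['value', 'roi', 'revenue', 'cost', 'pr value', 'monetary']):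
--             categories["Value & ROI Analysis"].append((chart_title, chart_path))
--         elif any(keyword in title_lower for keyword in ['correlation', 'matrix', 'heatmap', 'scatter', 'relationship']):
--             categories["Correlation & Advanced Analytics"].append((chart_title, chart_path))
--         else:
--             categories["Other Analytics"].append((chart_title, chart_path))
--
--     # Remove empty categories
--     return {k: v for k, v in categories.items() if v}
-- ===== SOURCE B (Python) =====
-- from typing import List, Tuple, Dict
--
-- # Priority order of A's if/elif chain (first match wins).
-- RULES = [
--     ("Data Distribution & Performance", ['media', 'distribution', 'count', 'type', 'pie', 'bar']),
--     ("Trend Analysis & Time Series", ['trend', 'time', 'over time', 'progression', 'line', 'series']),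
--     ("Platform & Channel Analysis", ['platform', 'channel', 'comparison', 'performance']),
--     ("Sentiment & Engagement Analysis", ['sentiment', 'engagement', 'emotion', 'feeling']),
--     ("Value & ROI Analysis", ['value', 'roi', 'revenue', 'cost', 'pr value', 'monetary']),
--     ("Correlation & Advanced Analytics", ['correlation', 'matrix', 'heatmap', 'scatter', 'relationship']),
-- ]
--
-- # Output (dict-insertion) order of the result.
-- CATEGORY_ORDER = [
--     "Trend Analysis & Time Series",
--     "Platform & Channel Analysis",
--     "Sentiment & Engagement Analysis",
--     "Value & ROI Analysis",
--     "Correlation & Advanced Analytics",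
--     "Other Analytics",
--     "Data Distribution & Performance",
-- ]
--
-- def _classify(title: str) -> str:
--     tl = title.lower()
--     return next((cat for cat, kws in RULES if any(k in tl for k in kws)), "Other Analytics")
--
-- def organize_charts_by_category(charts: List[Tuple[str, str]]) -> Dict[str, List[Tuple[str, str]]]:
--     labeled = [(_classify(t), (t, p)) for t, p in charts]
--     out = {}
--     for cat in CATEGORY_ORDER:
--         bucket = [pair for lab, pair in labeled if lab == cat]
--         if bucket:
--             out[cat] = bucket
--     return out
-- ===== Notes on version B (the rewrite author's own statement) =====
-- stated objective: idiomatic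
-- what changed: Replaces the single-pass if/elif-chain dict-append loop (with an unused detect_graph_type call per chart) by a data-driven RULES table with a first-match classifier and a category-major pass that filters the labeled charts per output category.
import Mathlib
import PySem

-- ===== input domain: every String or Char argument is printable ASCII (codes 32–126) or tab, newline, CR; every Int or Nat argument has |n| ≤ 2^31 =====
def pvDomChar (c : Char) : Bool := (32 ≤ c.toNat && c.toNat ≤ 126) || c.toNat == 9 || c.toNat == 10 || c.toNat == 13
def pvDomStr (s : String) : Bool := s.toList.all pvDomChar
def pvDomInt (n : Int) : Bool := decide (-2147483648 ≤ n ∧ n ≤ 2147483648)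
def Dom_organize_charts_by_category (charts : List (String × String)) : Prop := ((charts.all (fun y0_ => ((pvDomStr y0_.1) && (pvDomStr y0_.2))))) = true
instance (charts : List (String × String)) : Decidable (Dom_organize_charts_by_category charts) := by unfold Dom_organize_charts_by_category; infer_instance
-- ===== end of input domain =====

-- B replaces A's single-pass if/elif dict-append loop by a rules table + first-match classifier and a
-- category-major filtering pass (idiomatic, same cost); B drops A's unused pure detect_graph_type call.

-- ===== PORT A =====
def detect_graph_type (chart_title : String) : String :=
  let title_lower := PySem.Str.lower chart_title
  if ["bar", "column", "histogram"].any (fun k => PySem.Str.isIn k title_lower) then "Bar Chart"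
  else if ["line", "trend", "progression", "over time"].any (fun k => PySem.Str.isIn k title_lower) then "Line Chart"
  else if ["pie", "donut", "distribution"].any (fun k => PySem.Str.isIn k title_lower) then "Pie Chart"
  else if ["scatter", "correlation"].any (fun k => PySem.Str.isIn k title_lower) then "Scatter Plot"
  else if ["heatmap", "heat map", "density"].any (fun k => PySem.Str.isIn k title_lower) then "Heatmap"
  else if ["3d", "three", "dimensional"].any (fun k => PySem.Str.isIn k title_lower) then "3D Visualization"
  else if ["area", "stacked"].any (fun k => PySem.Str.isIn k title_lower) then "Area Chart"
  else if ["bubble", "size"].any (fun k => PySem.Str.isIn k title_lower) then "Bubble Chart"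
  else "Data Visualization"

-- A's loop body (the if/elif chain appending into the category dict).
-- categories[k].append(pair): the key is always present, so d[k] = d.get(k, []) ++ [pair] is exact.
def pvStepA (d : PySem.Dict String (List (String × String))) (p : String × String) :
    PySem.Dict String (List (String × String)) :=
  let title_lower := PySem.Str.lower p.1
  let _graph_type := detect_graph_type p.1   -- computed and unused, as in A
  if ["media", "distribution", "count", "type", "pie", "bar"].any (fun k => PySem.Str.isIn k title_lower) then
    d.modify "Data Distribution & Performance" [] (· ++ [p])
  else if ["trend", "time", "over time", "progression", "line", "series"].any (fun k => PySem.Str.isIn k title_lower) then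
    d.modify "Trend Analysis & Time Series" [] (· ++ [p])
  else if ["platform", "channel", "comparison", "performance"].any (fun k => PySem.Str.isIn k title_lower) then
    d.modify "Platform & Channel Analysis" [] (· ++ [p])
  else if ["sentiment", "engagement", "emotion", "feeling"].any (fun k => PySem.Str.isIn k title_lower) then
    d.modify "Sentiment & Engagement Analysis" [] (· ++ [p])
  else if ["value", "roi", "revenue", "cost", "pr value", "monetary"].any (fun k => PySem.Str.isIn k title_lower) then
    d.modify "Value & ROI Analysis" [] (· ++ [p])
  else if ["correlation", "matrix", "heatmap", "scatter", "relationship"].any (fun k => PySem.Str.isIn k title_lower) then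
    d.modify "Correlation & Advanced Analytics" [] (· ++ [p])
  else
    d.modify "Other Analytics" [] (· ++ [p])

def organize_charts_by_category (charts : List (String × String)) : List (String × List (String × String)) :=
  let categories : PySem.Dict String (List (String × String)) := PySem.Dict.mk
    [("Trend Analysis & Time Series", []),
     ("Platform & Channel Analysis", []),
     ("Sentiment & Engagement Analysis", []),
     ("Value & ROI Analysis", []),
     ("Correlation & Advanced Analytics", []),
     ("Other Analytics", []),
     ("Data Distribution & Performance", [])]
  let categories := charts.foldl pvStepA categories
  -- {k: v for k, v in categories.items() if v}  (keys are distinct, so the new dict's items are the filtered items)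
  categories.items.filter (fun kv => !kv.2.isEmpty)

-- ===== PORT B =====
def pvRules : List (String × List String) :=
  [("Data Distribution & Performance", ["media", "distribution", "count", "type", "pie", "bar"]),
   ("Trend Analysis & Time Series", ["trend", "time", "over time", "progression", "line", "series"]),
   ("Platform & Channel Analysis", ["platform", "channel", "comparison", "performance"]),
   ("Sentiment & Engagement Analysis", ["sentiment", "engagement", "emotion", "feeling"]),
   ("Value & ROI Analysis", ["value", "roi", "revenue", "cost", "pr value", "monetary"]),
   ("Correlation & Advanced Analytics", ["correlation", "matrix", "heatmap", "scatter", "relationship"])]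

def pvCategoryOrder : List String :=
  ["Trend Analysis & Time Series",
   "Platform & Channel Analysis",
   "Sentiment & Engagement Analysis",
   "Value & ROI Analysis",
   "Correlation & Advanced Analytics",
   "Other Analytics",
   "Data Distribution & Performance"]

def pvClassify (title : String) : String :=
  let tl := PySem.Str.lower title
  match pvRules.find? (fun r => r.2.any (fun k => PySem.Str.isIn k tl)) with
  | some r => r.1
  | none => "Other Analytics"

def organize_charts_by_category_alt (charts : List (String × String)) : List (String × List (String × String)) :=
  let labeled := charts.map (fun p => (pvClassify p.1, p))
  (pvCategoryOrder.map (fun cat => (cat, (labeled.filter (fun q => q.1 == cat)).map (·.2)))).filter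
    (fun kv => !kv.2.isEmpty)

-- ===== PRECONDITION & SPEC =====
def Spec_organize_charts_by_category (charts : List (String × String)) (out : List (String × List (String × String))) : Prop := out = organize_charts_by_category_alt charts
instance (charts : List (String × String)) (out : List (String × List (String × String))) : Decidable (Spec_organize_charts_by_category charts out) := by unfold Spec_organize_charts_by_category; infer_instance

-- ===== CLAIM (what is proved, stated in full; the proofs are below) =====
def Claim_equal_organize_charts_by_category : Prop := ∀ (charts : List (String × String)), Dom_organize_charts_by_category charts → Spec_organize_charts_by_category charts (organize_charts_by_category charts)

-- ===== LEMMAS AND PROOFS =====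

-- A's loop body picks exactly the bucket B's classifier names.
theorem pvStepA_eq (d : PySem.Dict String (List (String × String))) (p : String × String) :
    pvStepA d p = d.modify (pvClassify p.1) [] (· ++ [p]) := by
  unfold pvStepA pvClassify pvRules
  simp only [List.find?]
  split_ifs with h1 h2 h3 h4 h5 h6 <;>
    simp only [Bool.not_eq_true] at * <;> simp only [*]

theorem pvClassify_mem (t : String) :
    pvClassify t ∈ ["Trend Analysis & Time Series", "Platform & Channel Analysis",
      "Sentiment & Engagement Analysis", "Value & ROI Analysis",
      "Correlation & Advanced Analytics", "Other Analytics", "Data Distribution & Performance"] := by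
  unfold pvClassify pvRules
  simp only [List.find?]
  cases hb1 : (["media", "distribution", "count", "type", "pie", "bar"].any (fun k => PySem.Str.isIn k (PySem.Str.lower t))) <;>
  cases hb2 : (["trend", "time", "over time", "progression", "line", "series"].any (fun k => PySem.Str.isIn k (PySem.Str.lower t))) <;>
  cases hb3 : (["platform", "channel", "comparison", "performance"].any (fun k => PySem.Str.isIn k (PySem.Str.lower t))) <;>
  cases hb4 : (["sentiment", "engagement", "emotion", "feeling"].any (fun k => PySem.Str.isIn k (PySem.Str.lower t))) <;>
  cases hb5 : (["value", "roi", "revenue", "cost", "pr value", "monetary"].any (fun k => PySem.Str.isIn k (PySem.Str.lower t))) <;>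
  cases hb6 : (["correlation", "matrix", "heatmap", "scatter", "relationship"].any (fun k => PySem.Str.isIn k (PySem.Str.lower t))) <;>
  simp

-- B's labeled-filter-map bucket equals a plain filter by classifier.
theorem pv_bucket_eq (l : List (String × String)) (c : String) :
    ((l.map (fun p => (pvClassify p.1, p))).filter (fun q => q.1 == c)).map (·.2)
      = l.filter (fun p => pvClassify p.1 == c) := by
  induction l with
  | nil => rfl
  | cons h t ih => by_cases hc : pvClassify h.1 == c <;> simp [hc, ih]

-- Loop invariant: A's foldl over the 7-key dict appends, per key, exactly B's bucket.
theorem pv_loop_inv (l : List (String × String)) (t1 t2 t3 t4 t5 t6 t7 : List (String × String)) :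
    l.foldl pvStepA
      (PySem.Dict.mk
        [("Trend Analysis & Time Series", t1),
         ("Platform & Channel Analysis", t2),
         ("Sentiment & Engagement Analysis", t3),
         ("Value & ROI Analysis", t4),
         ("Correlation & Advanced Analytics", t5),
         ("Other Analytics", t6),
         ("Data Distribution & Performance", t7)])
    = PySem.Dict.mk
        [("Trend Analysis & Time Series", t1 ++ l.filter (fun p => pvClassify p.1 == "Trend Analysis & Time Series")),
         ("Platform & Channel Analysis", t2 ++ l.filter (fun p => pvClassify p.1 == "Platform & Channel Analysis")),
         ("Sentiment & Engagement Analysis", t3 ++ l.filter (fun p => pvClassify p.1 == "Sentiment & Engagement Analysis")),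
         ("Value & ROI Analysis", t4 ++ l.filter (fun p => pvClassify p.1 == "Value & ROI Analysis")),
         ("Correlation & Advanced Analytics", t5 ++ l.filter (fun p => pvClassify p.1 == "Correlation & Advanced Analytics")),
         ("Other Analytics", t6 ++ l.filter (fun p => pvClassify p.1 == "Other Analytics")),
         ("Data Distribution & Performance", t7 ++ l.filter (fun p => pvClassify p.1 == "Data Distribution & Performance"))] := by
  induction l generalizing t1 t2 t3 t4 t5 t6 t7 with
  | nil => simp
  | cons h t ih =>
    rw [List.foldl_cons, pvStepA_eq]
    have hm := pvClassify_mem h.1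
    simp only [List.mem_cons, List.not_mem_nil, or_false] at hm
    rcases hm with hc | hc | hc | hc | hc | hc | hc <;>
      rw [hc] <;>
      simp [PySem.Dict.modify, PySem.Dict.insert, PySem.Dict.getD, PySem.Dict.get?,
        PySem.Dict.contains, ih, hc]

-- ===== VERDICT (by name: the statement is the Claim_ definition above) =====
theorem organize_charts_by_category_spec : Claim_equal_organize_charts_by_category := by
  intro charts _
  show organize_charts_by_category charts = organize_charts_by_category_alt charts
  simp only [organize_charts_by_category, organize_charts_by_category_alt]
  rw [pv_loop_inv]
  simp [pvCategoryOrder, pv_bucket_eq]
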